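-- pv_equiv track=rewrite | github.com/BowmanStephen/Script_Ohio_2.0 | project_management/documentation_consolidation_agent.py | _clean_content_for_consolidation
-- ===== SOURCE A (Python) =====
-- def _clean_content_for_consolidation(content: str) -> str:
--     """Clean content for consolidation"""
--     lines = content.split('\n')
--     clean_lines = []
--
--     # Remove leading/trailing empty lines
--     while lines and not lines[0].strip():
--         lines.pop(0)
--     while lines and not lines[-1].strip():
--         lines.pop()
--
--     for line in lines:
--         # Skip title if it's the first line (we'll add our own)
--         if clean_lines or not line.strip().startswith('#'):
--             clean_lines.append(line)
--
--     return '\n'.join(clean_lines)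
-- ===== SOURCE B (Python) =====
-- def _clean_content_for_consolidation(content: str) -> str:
--     """Clean content for consolidation"""
--     lines = content.split('\n')
--     start, end = 0, len(lines)
--     while start < end and not lines[start].strip():
--         start += 1
--     while end > start and not lines[end - 1].strip():
--         end -= 1
--     while start < end and lines[start].strip().startswith('#'):
--         start += 1
--     return '\n'.join(lines[start:end])
-- ===== Notes on version B (the rewrite author's own statement) =====
-- stated objective: simpler
-- what changed: Replaces A's destructive pop-based trimming and the accumulator filter loop with two integer pointers advanced/retracted over the line list plus one final slice-and-join.
import Mathlib
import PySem

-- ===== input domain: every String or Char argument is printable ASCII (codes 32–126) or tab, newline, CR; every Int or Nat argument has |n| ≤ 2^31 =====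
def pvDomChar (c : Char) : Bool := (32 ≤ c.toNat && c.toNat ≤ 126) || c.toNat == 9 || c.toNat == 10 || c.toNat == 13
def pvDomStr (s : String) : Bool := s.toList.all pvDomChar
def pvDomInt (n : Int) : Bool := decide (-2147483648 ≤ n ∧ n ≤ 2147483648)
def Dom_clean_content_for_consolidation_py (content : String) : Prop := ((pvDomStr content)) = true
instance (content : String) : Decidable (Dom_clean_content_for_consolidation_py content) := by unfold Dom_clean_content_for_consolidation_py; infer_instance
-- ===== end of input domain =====

-- B replaces A's destructive pop-based trimming and accumulator filter loop with
-- two integer pointers over the line list and one final slice ("simpler": different decomposition).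

-- shared trivial predicates: a line is blank after strip / starts with '#' after strip
def pvBlank (l : String) : Bool := PySem.Str.strip l == ""
def pvHash (l : String) : Bool := PySem.Str.startswith (PySem.Str.strip l) "#"

-- content.split('\n'); split? is `some` because the separator literal is nonempty
def pvSplitLines (content : String) : List String :=
  (PySem.Str.split? content "\n").getD []

-- ===== PORT A =====
-- while lines and not lines[0].strip(): lines.pop(0)
def pvPopLeading : List String → List String
  | [] => []
  | l :: ls => if pvBlank l then pvPopLeading ls else l :: ls

-- while lines and not lines[-1].strip(): lines.pop()
def pvPopTrailing (ls : List String) : List String :=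
  if h : ls.getLast?.elim false pvBlank then pvPopTrailing ls.dropLast else ls
termination_by ls.length
decreasing_by
  cases ls with
  | nil => simp at h
  | cons a l => simp

-- for line in lines: if clean_lines or not line.strip().startswith('#'): clean_lines.append(line)
def pvFilterLoop (acc : List String) : List String → List String
  | [] => acc
  | l :: ls => pvFilterLoop (if acc ≠ [] ∨ ¬ pvHash l then acc ++ [l] else acc) ls

def clean_content_for_consolidation_py (content : String) : String :=
  let lines := pvSplitLines content
  let lines := pvPopLeading lines
  let lines := pvPopTrailing lines
  PySem.Str.join "\n" (pvFilterLoop [] lines)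

-- ===== PORT B =====
-- while start < end and not lines[start].strip(): start += 1
-- (lines.getD start "" is Python's lines[start]: the loop only reads indices < stop ≤ len)
def pvAdvBlank (lines : List String) (stop start : Nat) : Nat :=
  if start < stop ∧ pvBlank (lines.getD start "") then pvAdvBlank lines stop (start + 1) else start
termination_by stop - start
decreasing_by omega

-- while end > start and not lines[end-1].strip(): end -= 1
def pvRetBlank (lines : List String) (start e : Nat) : Nat :=
  if e > start ∧ pvBlank (lines.getD (e - 1) "") then pvRetBlank lines start (e - 1) else e
termination_by e - start
decreasing_by omega

-- while start < end and lines[start].strip().startswith('#'): start += 1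
def pvAdvHash (lines : List String) (stop start : Nat) : Nat :=
  if start < stop ∧ pvHash (lines.getD start "") then pvAdvHash lines stop (start + 1) else start
termination_by stop - start
decreasing_by omega

def clean_content_for_consolidation_py_alt (content : String) : String :=
  let lines := pvSplitLines content
  let start := pvAdvBlank lines lines.length 0
  let e := pvRetBlank lines start lines.length
  let start := pvAdvHash lines e start
  -- lines[start:end] with 0 ≤ start ≤ end ≤ len is exactly (lines.drop start).take (e - start)
  PySem.Str.join "\n" ((lines.drop start).take (e - start))

-- ===== PRECONDITION & SPEC =====
def Spec_clean_content_for_consolidation_py (content : String) (out : String) : Prop := out = clean_content_for_consolidation_py_alt content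
instance (content : String) (out : String) : Decidable (Spec_clean_content_for_consolidation_py content out) := by unfold Spec_clean_content_for_consolidation_py; infer_instance

-- ===== CLAIM (what is proved, stated in full; the proofs are below) =====
def Claim_equal_clean_content_for_consolidation_py : Prop := ∀ (content : String), Dom_clean_content_for_consolidation_py content → Spec_clean_content_for_consolidation_py content (clean_content_for_consolidation_py content)

-- ===== LEMMAS AND PROOFS =====

-- A-side characterisations
theorem pvPopLeading_eq (ls : List String) : pvPopLeading ls = ls.dropWhile pvBlank := by
  induction ls with
  | nil => rfl
  | cons l ls ih => simp [pvPopLeading, List.dropWhile_cons]; split_ifs <;> simp_all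

theorem pvPopTrailing_eq (ls : List String) :
    pvPopTrailing ls = (ls.reverse.dropWhile pvBlank).reverse := by
  fun_induction pvPopTrailing ls with
  | case1 ls h ih =>
      rcases List.eq_nil_or_concat ls with rfl | ⟨a, x, rfl⟩
      · exact Bool.noConfusion (show false = true from h)
      · have hx : pvBlank x := by simpa using h
        rw [ih]
        simp [hx]
  | case2 ls h =>
      rcases List.eq_nil_or_concat ls with rfl | ⟨a, x, rfl⟩
      · simp
      · have hx : pvBlank x = false := by simpa using h
        simp [hx]

theorem pvFilterLoop_acc (a : String) (acc ls : List String) :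
    pvFilterLoop (a :: acc) ls = (a :: acc) ++ ls := by
  induction ls generalizing acc with
  | nil => simp [pvFilterLoop]
  | cons l ls ih => simp [pvFilterLoop, ih]

theorem pvFilterLoop_nil (ls : List String) : pvFilterLoop [] ls = ls.dropWhile pvHash := by
  induction ls with
  | nil => rfl
  | cons l ls ih =>
      simp only [pvFilterLoop, List.dropWhile_cons]
      by_cases h : pvHash l
      · simp [h, ih]
      · simp [h, pvFilterLoop_acc]

-- slice split-off of the last element, used for the retracting pointer
theorem pv_take_concat (lines : List String) (start e : Nat) (h1 : start < e)
    (h2 : e ≤ lines.length) :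
    (lines.drop start).take (e - start)
      = (lines.drop start).take (e - 1 - start) ++ [lines[e - 1]'(by omega)] := by
  have hk : e - start = (e - 1 - start) + 1 := by omega
  rw [hk, List.take_add_one]
  have : (lines.drop start)[e - 1 - start]? = some (lines[e-1]'(by omega)) := by
    rw [List.getElem?_drop]
    rw [List.getElem?_eq_getElem (by omega)]
    congr 1
    congr 1
    omega
  simp [this]

-- B-side characterisations
theorem pvAdvBlank_eq (lines : List String) (start : Nat) :
    lines.drop (pvAdvBlank lines lines.length start) = (lines.drop start).dropWhile pvBlank := by
  fun_induction pvAdvBlank lines lines.length start with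
  | case1 start h ih =>
      obtain ⟨hs, hb⟩ := h
      rw [ih, List.drop_eq_getElem_cons hs, List.dropWhile_cons]
      rw [List.getD_eq_getElem _ _ hs] at hb
      simp [hb]
  | case2 start h =>
      rcases Nat.lt_or_ge start lines.length with hs | hs
      · have hb : pvBlank (lines.getD start "") = false := by
          by_contra hc
          exact h ⟨hs, by simpa using hc⟩
        rw [List.drop_eq_getElem_cons hs, List.dropWhile_cons]
        rw [List.getD_eq_getElem _ _ hs] at hb
        simp [hb]
      · simp [List.drop_of_length_le hs]

theorem pvRetBlank_le (lines : List String) (start e : Nat) :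
    pvRetBlank lines start e ≤ e := by
  fun_induction pvRetBlank lines start e with
  | case1 e h ih => omega
  | case2 e h => omega

theorem pvRetBlank_eq (lines : List String) (start e : Nat) (he : e ≤ lines.length) :
    (lines.drop start).take (pvRetBlank lines start e - start)
      = ((((lines.drop start).take (e - start)).reverse.dropWhile pvBlank)).reverse := by
  fun_induction pvRetBlank lines start e with
  | case1 e h ih =>
      obtain ⟨hs, hb⟩ := h
      rw [ih (by omega)]
      rw [pv_take_concat lines start e hs he]
      rw [List.getD_eq_getElem _ _ (show e - 1 < lines.length by omega)] at hb
      simp [hb]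
  | case2 e h =>
      rcases Nat.lt_or_ge start e with hs | hs
      · have hb : pvBlank (lines.getD (e - 1) "") = false := by
          by_contra hc
          exact h ⟨hs, by simpa using hc⟩
        rw [pv_take_concat lines start e hs he]
        rw [List.getD_eq_getElem _ _ (show e - 1 < lines.length by omega)] at hb
        simp [hb]
      · have : e - start = 0 := by omega
        simp [this]

theorem pvAdvHash_eq (lines : List String) (stop start : Nat) (hs : stop ≤ lines.length) :
    (lines.drop (pvAdvHash lines stop start)).take (stop - pvAdvHash lines stop start)
      = ((lines.drop start).take (stop - start)).dropWhile pvHash := by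
  fun_induction pvAdvHash lines stop start with
  | case1 start h ih =>
      obtain ⟨hlt, hh⟩ := h
      rw [ih]
      have hidx : start < lines.length := by omega
      have hsplit : (lines.drop start).take (stop - start)
          = lines[start] :: (lines.drop (start + 1)).take (stop - (start + 1)) := by
        rw [List.drop_eq_getElem_cons hidx]
        have hk : stop - start = (stop - (start + 1)) + 1 := by omega
        rw [hk, List.take_succ_cons]
      rw [hsplit, List.dropWhile_cons]
      rw [List.getD_eq_getElem _ _ hidx] at hh
      simp [hh]
  | case2 start h =>
      rcases Nat.lt_or_ge start stop with hlt | hge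
      · have hh : pvHash (lines.getD start "") = false := by
          by_contra hc
          exact h ⟨hlt, by simpa using hc⟩
        have hidx : start < lines.length := by omega
        have hsplit : (lines.drop start).take (stop - start)
            = lines[start] :: (lines.drop (start + 1)).take (stop - (start + 1)) := by
          rw [List.drop_eq_getElem_cons hidx]
          have hk : stop - start = (stop - (start + 1)) + 1 := by omega
          rw [hk, List.take_succ_cons]
        rw [List.getD_eq_getElem _ _ hidx] at hh
        rw [hsplit, List.dropWhile_cons]
        simp [hh]
      · have : stop - start = 0 := by omega
        simp [this]

-- main list-level equality: A's cleaned line list = B's slice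
theorem pv_lists_eq (lines : List String) :
    pvFilterLoop [] (pvPopTrailing (pvPopLeading lines))
      = (lines.drop (pvAdvHash lines (pvRetBlank lines (pvAdvBlank lines lines.length 0) lines.length) (pvAdvBlank lines lines.length 0))).take
          (pvRetBlank lines (pvAdvBlank lines lines.length 0) lines.length - pvAdvHash lines (pvRetBlank lines (pvAdvBlank lines lines.length 0) lines.length) (pvAdvBlank lines lines.length 0)) := by
  set s1 := pvAdvBlank lines lines.length 0 with hs1
  set e := pvRetBlank lines s1 lines.length with he
  have hD : lines.drop s1 = lines.dropWhile pvBlank := by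
    rw [hs1, pvAdvBlank_eq]; simp
  have heLe : e ≤ lines.length := pvRetBlank_le lines s1 lines.length
  rw [pvAdvHash_eq lines e _ heLe]
  rw [he, pvRetBlank_eq lines s1 lines.length le_rfl]
  have htake : (lines.drop s1).take (lines.length - s1) = lines.drop s1 := by
    apply List.take_of_length_le; simp
  rw [htake, hD]
  rw [pvFilterLoop_nil, pvPopTrailing_eq, pvPopLeading_eq]

-- ===== VERDICT (by name: the statement is the Claim_ definition above) =====
theorem clean_content_for_consolidation_py_spec : Claim_equal_clean_content_for_consolidation_py := by
  intro content _
  unfold Spec_clean_content_for_consolidation_py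
  show clean_content_for_consolidation_py content = clean_content_for_consolidation_py_alt content
  simp only [clean_content_for_consolidation_py, clean_content_for_consolidation_py_alt]
  rw [pv_lists_eq]
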